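-- pv_equiv track=rewrite | github.com/NiharikaSharma2017/Natural-Language-Processing | HW1/Compute_Cross_Entropy.py | get_trigram_context_counts
-- ===== SOURCE A (Python) =====
-- def get_trigram_context_counts(l):
--     counts ={}
--     context_counts = {}
--     for my_trigram in l:
--         if my_trigram in counts:
--             counts[my_trigram] += 1
--         else:
--             counts[my_trigram] = 1
--         my_words = list(my_trigram)
--         my_words.pop()
--         my_context = "".join(my_words)
--         if my_context in context_counts:
--             context_counts[my_context] += 1
--         else:
--             context_counts[my_context] = 1
--     return counts, context_counts
-- ===== SOURCE B (Python) =====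
-- def get_trigram_context_counts(l):
--     counts = {}
--     for my_trigram in l:
--         counts[my_trigram] = counts.get(my_trigram, 0) + 1
--     context_counts = {}
--     for my_trigram, c in counts.items():
--         *context_chars, _last = my_trigram
--         my_context = "".join(context_chars)
--         context_counts[my_context] = context_counts.get(my_context, 0) + c
--     return counts, context_counts
-- ===== Notes on version B (the rewrite author's own statement) =====
-- stated objective: alternative
-- what changed: B counts trigrams in one pass and then derives context_counts by a second weighted-aggregation pass over the distinct trigrams of counts.items() (adding each trigram's count to its context), instead of A's incrementing both dicts on every list element.
import Mathlib
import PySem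

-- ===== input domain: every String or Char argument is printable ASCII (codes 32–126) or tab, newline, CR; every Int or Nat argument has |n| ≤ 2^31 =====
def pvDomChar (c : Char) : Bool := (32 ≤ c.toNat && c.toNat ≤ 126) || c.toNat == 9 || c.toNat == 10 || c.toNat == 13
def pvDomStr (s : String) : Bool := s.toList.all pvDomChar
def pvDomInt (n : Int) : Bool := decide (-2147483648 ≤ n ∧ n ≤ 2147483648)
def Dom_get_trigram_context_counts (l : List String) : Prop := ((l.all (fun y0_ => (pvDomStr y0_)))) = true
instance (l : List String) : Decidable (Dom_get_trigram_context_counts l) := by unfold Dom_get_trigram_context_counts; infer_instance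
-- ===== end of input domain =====

-- B replaces A's per-element double increment by one counting pass plus a weighted aggregation
-- over the distinct trigrams of counts.items(): same asymptotic cost, context-dict work once per
-- distinct trigram instead of once per element (objective: alternative decomposition).

-- ===== PORT A =====
-- one loop step for `counts` (if-in-then-+=1-else-=1)
def aStep1 (d : PySem.Dict String Int) (my_trigram : String) : PySem.Dict String Int :=
  if d.contains my_trigram then d.insert my_trigram (d.getD my_trigram 0 + 1)
  else d.insert my_trigram 1

-- one loop step for `context_counts`: list(t), .pop(), "".join, then the same if-in pattern
def aStep2 (d : PySem.Dict String Int) (my_trigram : String) : PySem.Dict String Int :=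
  let my_words := my_trigram.toList
  let rest := match PySem.List.pop? my_words with
              | some r => r.2
              | none => []   -- Python raises IndexError here (my_trigram = ""); excluded by Pre_
  let my_context := String.mk rest
  if d.contains my_context then d.insert my_context (d.getD my_context 0 + 1)
  else d.insert my_context 1

def get_trigram_context_counts (l : List String) : (List (String × Int)) × (List (String × Int)) :=
  let st := l.foldl (fun (st : PySem.Dict String Int × PySem.Dict String Int) my_trigram =>
      (aStep1 st.1 my_trigram, aStep2 st.2 my_trigram)) (PySem.Dict.empty, PySem.Dict.empty)
  (st.1.items, st.2.items)

-- ===== PORT B =====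
-- `*context_chars, _last = my_trigram` then "".join(context_chars): the chars minus the last
-- (Python raises ValueError on my_trigram = ""; such inputs are outside Pre_, where the port's dropLast is harmless)
def bCtx (my_trigram : String) : String :=
  String.mk my_trigram.toList.dropLast

def get_trigram_context_counts_alt (l : List String) : (List (String × Int)) × (List (String × Int)) :=
  let counts := l.foldl (fun d my_trigram => d.insert my_trigram (d.getD my_trigram 0 + 1)) PySem.Dict.empty
  let context_counts := counts.items.foldl (fun d p => d.insert (bCtx p.1) (d.getD (bCtx p.1) 0 + p.2)) PySem.Dict.empty
  (counts.items, context_counts.items)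

-- ===== PRECONDITION & SPEC =====
-- Pre_ excludes lists containing the empty string, on which Python A raises IndexError (pop from empty list).
def Pre_get_trigram_context_counts (l : List String) : Prop := ∀ s ∈ l, s ≠ ""
instance (l : List String) : Decidable (Pre_get_trigram_context_counts l) := by unfold Pre_get_trigram_context_counts; infer_instance
def pvWitness_get_trigram_context_counts : List String := ["abc", "abd", "abc", "xyz"]

def Spec_get_trigram_context_counts (l : List String) (out : (List (String × Int)) × (List (String × Int))) : Prop := out = get_trigram_context_counts_alt l
instance (l : List String) (out : (List (String × Int)) × (List (String × Int))) : Decidable (Spec_get_trigram_context_counts l out) := by unfold Spec_get_trigram_context_counts; infer_instance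

-- ===== CLAIM (what is proved, stated in full; the proofs are below) =====
def Claim_equal_get_trigram_context_counts : Prop := ∀ (l : List String), Dom_get_trigram_context_counts l → Pre_get_trigram_context_counts l → Spec_get_trigram_context_counts l (get_trigram_context_counts l)

-- ===== LEMMAS AND PROOFS =====

-- the common context function both ports compute
def ctxF (s : String) : String := String.mk s.toList.dropLast

lemma pop_rest_eq (cs : List Char) :
    (match PySem.List.pop? cs with | some r => r.2 | none => []) = cs.dropLast := by
  cases cs using List.reverseRecOn with
  | nil => rfl
  | append_singleton ys y => rw [PySem.List.pop?_last]; simp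

lemma aStep1_eq (d : PySem.Dict String Int) (t : String) :
    aStep1 d t = d.insert t (d.getD t 0 + 1) := by
  unfold aStep1
  by_cases h : d.contains t
  · simp [h]
  · simp only [Bool.not_eq_true] at h
    simp [h, PySem.Dict.getD_of_not_contains d 0 h]

lemma aStep2_eq (d : PySem.Dict String Int) (t : String) :
    aStep2 d t = d.insert (ctxF t) (d.getD (ctxF t) 0 + 1) := by
  unfold aStep2 ctxF
  simp only [pop_rest_eq]
  by_cases h : d.contains (String.mk t.toList.dropLast)
  · simp [h]
  · simp only [Bool.not_eq_true] at h
    simp [h, PySem.Dict.getD_of_not_contains d 0 h]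

lemma A_eq (l : List String) :
    get_trigram_context_counts l
      = ((PySem.Dict.counter l).items, (PySem.Dict.counter (l.map ctxF)).items) := by
  unfold get_trigram_context_counts
  rw [PySem.List.foldl_prod_mk (f := aStep1) (g := aStep2) l PySem.Dict.empty PySem.Dict.empty]
  have h1 : l.foldl aStep1 PySem.Dict.empty = PySem.Dict.counter l := by
    rw [PySem.List.foldl_congr_mem l aStep1 (fun d t => d.insert t (d.getD t 0 + 1))
      PySem.Dict.empty (fun d t _ => aStep1_eq d t)]
    exact PySem.Dict.foldl_insert_getD_add_one_eq_counter l
  have h2 : l.foldl aStep2 PySem.Dict.empty = PySem.Dict.counter (l.map ctxF) := by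
    rw [PySem.List.foldl_congr_mem l aStep2 (fun d t => d.insert (ctxF t) (d.getD (ctxF t) 0 + 1))
      PySem.Dict.empty (fun d t _ => aStep2_eq d t)]
    rw [← PySem.Dict.foldl_insert_getD_add_one_eq_counter (l.map ctxF), List.foldl_map]
  rw [h1, h2]

lemma bCtx_eq : bCtx = ctxF := by
  funext s; rfl

-- getD of the B-side aggregation loop: the initial value plus the sum of the amounts whose key maps to c
lemma getD_fold_add (ps : List (String × Int)) (d : PySem.Dict String Int) (c : String) :
    (ps.foldl (fun d p => d.insert (ctxF p.1) (d.getD (ctxF p.1) 0 + p.2)) d).getD c 0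
      = d.getD c 0 + ((ps.filter (fun p => ctxF p.1 = c)).map Prod.snd).sum := by
  induction ps generalizing d with
  | nil => simp
  | cons p ps ih =>
    rw [List.foldl_cons, ih, PySem.Dict.getD_insert]
    by_cases h : c = ctxF p.1
    · subst h
      simp
      ring
    · have h2 : ¬ ctxF p.1 = c := fun hh => h hh.symm
      simp [h, h2]

lemma keys_fold_add (ps : List (String × Int)) :
    (ps.foldl (fun d p => d.insert (ctxF p.1) (d.getD (ctxF p.1) 0 + p.2)) PySem.Dict.empty).keys
      = PySem.Set.ofList (ps.map (fun p => ctxF p.1)) := by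
  rw [PySem.Dict.keys_foldl_insert_key ps (fun p => ctxF p.1)
    (fun d p => d.getD (ctxF p.1) 0 + p.2) PySem.Dict.empty]
  simp [PySem.Dict.keys_empty]
  rfl

lemma ofList_append_singleton {α : Type} [DecidableEq α] (l : List α) (x : α) :
    PySem.Set.ofList (l ++ [x]) = PySem.Set.add (PySem.Set.ofList l) x := by
  simp [PySem.Set.ofList_eq_foldl, List.foldl_append]

lemma ofList_map_ofList {α β : Type} [DecidableEq α] [DecidableEq β] (f : α → β) (l : List α) :
    PySem.Set.ofList (List.map f (PySem.Set.ofList l)) = PySem.Set.ofList (List.map f l) := by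
  induction l using List.reverseRecOn with
  | nil => rfl
  | append_singleton ys y ih =>
    rw [ofList_append_singleton, List.map_append, List.map_singleton, ofList_append_singleton]
    by_cases h : y ∈ PySem.Set.ofList ys
    · have h1 : PySem.Set.add (PySem.Set.ofList ys) y = PySem.Set.ofList ys := by
        simp [PySem.Set.add, PySem.Set.contains, h]
      have h2 : f y ∈ PySem.Set.ofList (List.map f ys) := by
        rw [PySem.Set.mem_ofList] at h ⊢; exact List.mem_map_of_mem h
      have h3 : PySem.Set.add (PySem.Set.ofList (List.map f ys)) (f y) = PySem.Set.ofList (List.map f ys) := by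
        simp [PySem.Set.add, PySem.Set.contains, h2]
      rw [h1, ih, h3]
    · have h1 : PySem.Set.add (PySem.Set.ofList ys) y = PySem.Set.ofList ys ++ [y] := by
        simp [PySem.Set.add, PySem.Set.contains, h]
      rw [h1, List.map_append, List.map_singleton, ofList_append_singleton, ih]

lemma perm_ofList_dedup {α : Type} [DecidableEq α] (l : List α) :
    (PySem.Set.ofList l).Perm l.dedup := by
  rw [List.perm_ext_iff_of_nodup (PySem.Set.nodup_ofList l) (List.nodup_dedup l)]
  intro a; rw [PySem.Set.mem_ofList, List.mem_dedup]

-- weighted sum over the distinct trigrams = plain count over the mapped list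
lemma sum_counts_eq (l : List String) (c : String) :
    (((PySem.Set.ofList l).filter (fun k => ctxF k = c)).map (fun k => (l.count k : Int))).sum
      = ((l.map ctxF).count c : Int) := by
  have hperm : ((PySem.Set.ofList l).filter (fun k => decide (ctxF k = c))).Perm
      (l.dedup.filter (fun k => decide (ctxF k = c))) := (perm_ofList_dedup l).filter _
  have hmap := (hperm.map (fun k => (l.count k : Int))).sum_eq
  rw [hmap]
  have hcast : (List.map (fun k => (l.count k : Int)) (l.dedup.filter (fun k => decide (ctxF k = c)))).sum
      = (((l.dedup.filter (fun k => decide (ctxF k = c))).map (fun k => l.count k)).sum : Int) := by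
    rw [Nat.cast_list_sum, List.map_map]; rfl
  rw [hcast, List.sum_map_count_dedup_filter_eq_countP]
  congr 1
  rw [List.count_eq_countP, List.countP_map]
  apply List.countP_congr
  intro x _
  simp only [Function.comp_apply, beq_iff_eq, decide_eq_true_eq]

lemma get?_eq_of_getD_eq (d d' : PySem.Dict String Int) (c : String)
    (hc : d.contains c = true) (hc' : d'.contains c = true)
    (h : d.getD c 0 = d'.getD c 0) : d.get? c = d'.get? c := by
  rw [PySem.Dict.contains_eq_isSome_get?] at hc hc'
  cases hv : d.get? c with
  | none => rw [hv] at hc; simp at hc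
  | some v =>
    cases hv' : d'.get? c with
    | none => rw [hv'] at hc'; simp at hc'
    | some v' =>
      rw [PySem.Dict.getD_of_get?_eq_some d 0 hv, PySem.Dict.getD_of_get?_eq_some d' 0 hv'] at h
      rw [h]

lemma dict_eq_of_keys_get? (d d' : PySem.Dict String Int)
    (h1 : d.keys.Nodup) (hk : d.keys = d'.keys)
    (hv : ∀ c ∈ d.keys, d.get? c = d'.get? c) : d = d' := by
  have h1' : d'.keys.Nodup := hk ▸ h1
  apply PySem.Dict.ext
  have hlen : d.items.length = d'.items.length := by
    have hlk := congrArg List.length hk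
    simpa [PySem.Dict.keys] using hlk
  apply List.ext_getElem hlen
  intro i hi hi'
  have hmapeq : d.items.map Prod.fst = d'.items.map Prod.fst := by
    simpa [PySem.Dict.keys] using hk
  have hfst : (d.items[i]).1 = (d'.items[i]).1 := by
    have h := List.getElem_of_eq hmapeq (by simpa using hi)
    simpa using h
  have hmem : d.items[i] ∈ d.items := List.getElem_mem hi
  have hmem' : d'.items[i] ∈ d'.items := List.getElem_mem hi'
  have g1 : d.get? (d.items[i]).1 = some (d.items[i]).2 := by
    have hp : ((d.items[i]).1, (d.items[i]).2) ∈ d.items := by simpa using hmem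
    exact PySem.Dict.get?_of_mem_items d hp h1
  have g2 : d'.get? (d'.items[i]).1 = some (d'.items[i]).2 := by
    have hp : ((d'.items[i]).1, (d'.items[i]).2) ∈ d'.items := by simpa using hmem'
    exact PySem.Dict.get?_of_mem_items d' hp h1'
  have hvv := hv _ (by simp only [PySem.Dict.keys]; exact List.mem_map_of_mem hmem)
  rw [g1, hfst, g2] at hvv
  exact Prod.ext hfst (Option.some.inj hvv)

lemma B_fold_eq (l : List String) :
    ((PySem.Dict.counter l).items).foldl
        (fun d p => d.insert (ctxF p.1) (d.getD (ctxF p.1) 0 + p.2)) PySem.Dict.empty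
      = PySem.Dict.counter (l.map ctxF) := by
  have hkeys : (((PySem.Dict.counter l).items).foldl
      (fun d p => d.insert (ctxF p.1) (d.getD (ctxF p.1) 0 + p.2)) PySem.Dict.empty).keys
      = (PySem.Dict.counter (l.map ctxF)).keys := by
    rw [keys_fold_add, PySem.Dict.items_counter, List.map_map, PySem.Dict.keys_counter]
    exact ofList_map_ofList ctxF l
  apply dict_eq_of_keys_get?
  · exact PySem.Dict.nodup_keys_foldl_insert_key _ _ _ _ (by simp [PySem.Dict.keys_empty])
  · exact hkeys
  · intro c hc
    apply get?_eq_of_getD_eq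
    · exact (PySem.Dict.contains_iff_mem_keys _ _).mpr hc
    · exact (PySem.Dict.contains_iff_mem_keys _ _).mpr (hkeys ▸ hc)
    · rw [getD_fold_add, PySem.Dict.items_counter, List.filter_map, List.map_map,
        PySem.Dict.getD_counter]
      simp only [PySem.Dict.getD_empty, zero_add]
      simpa [Function.comp] using sum_counts_eq l c

lemma B_eq (l : List String) :
    get_trigram_context_counts_alt l
      = ((PySem.Dict.counter l).items, (PySem.Dict.counter (l.map ctxF)).items) := by
  unfold get_trigram_context_counts_alt
  rw [PySem.Dict.foldl_insert_getD_add_one_eq_counter l, bCtx_eq]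
  simp only [B_fold_eq l]

-- ===== VERDICT (by name: the statement is the Claim_ definition above) =====
theorem get_trigram_context_counts_spec : Claim_equal_get_trigram_context_counts := by
  intro l _ _
  unfold Spec_get_trigram_context_counts
  rw [A_eq, B_eq]
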